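-- pv_equiv track=rewrite | github.com/VMeida/mkc-assessment | MKC PowerBI Inventory/mkc_docs/scripts/extract_excel.py | gen_dataflow_inventory
-- ===== SOURCE A (Python) =====
-- def safe(v):
--     return str(v).strip() if v is not None else ""
--
-- def gen_dataflow_inventory(rows):
--     # workspace → dataflows
--     ws_flows: dict[str, set] = {}
--     for r in rows:
--         ws = safe(r.get("workspace_name"))
--         df = safe(r.get("dataflow_name"))
--         if ws and df:
--             ws_flows.setdefault(ws, set()).add(df)
--
--     total_flows = sum(len(v) for v in ws_flows.values())
--
--     lines = [
--         "# Dataflow Inventory",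
--         "",
--         "Auto-generated from **DFW Lineage** sheet of `MKC PowerBI Inventory (1).xlsx`.",
--         "",
--         f"!!! info \"Coverage\"",
--         f"    **{total_flows} unique dataflows** across **{len(ws_flows)} workspaces**",
--         "",
--         "## Summary by Workspace",
--         "",
--         "| Workspace | Dataflow Count | Dataflow Names |",
--         "|-----------|---------------|----------------|",
--     ]
--
--     for ws_name in sorted(ws_flows.keys()):
--         flows = sorted(ws_flows[ws_name])
--         flow_list = "<br>".join(flows) if flows else "—"
--         lines.append(f"| {ws_name} | {len(flows)} | {flow_list} |")
--
--     lines += [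
--         "",
--         "## Full Dataflow List",
--         "",
--         "| Workspace | Dataflow Name |",
--         "|-----------|---------------|",
--     ]
--     for ws_name in sorted(ws_flows.keys()):
--         for df in sorted(ws_flows[ws_name]):
--             lines.append(f"| {ws_name} | {df} |")
--
--     lines.append("")
--     return "\n".join(lines)
-- ===== SOURCE B (Python) =====
-- def safe(v):
--     return str(v).strip() if v is not None else ""
--
-- def gen_dataflow_inventory(rows):
--     # one pass: collect the distinct (workspace, dataflow) pairs
--     pairs = set()
--     for r in rows:
--         ws = safe(r.get("workspace_name"))
--         df = safe(r.get("dataflow_name"))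
--         if ws and df:
--             pairs.add((ws, df))
--
--     # one sorted table drives everything below
--     ordered = sorted(pairs)
--     ws_list = []
--     for ws, _ in ordered:
--         if ws not in ws_list:
--             ws_list.append(ws)
--     table = [(ws, [d for w, d in ordered if w == ws]) for ws in ws_list]
--
--     lines = [
--         "# Dataflow Inventory",
--         "",
--         "Auto-generated from **DFW Lineage** sheet of `MKC PowerBI Inventory (1).xlsx`.",
--         "",
--         "!!! info \"Coverage\"",
--         f"    **{len(ordered)} unique dataflows** across **{len(ws_list)} workspaces**",
--         "",
--         "## Summary by Workspace",
--         "",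
--         "| Workspace | Dataflow Count | Dataflow Names |",
--         "|-----------|---------------|----------------|",
--     ]
--     for ws, flows in table:
--         lines.append(f"| {ws} | {len(flows)} | {'<br>'.join(flows)} |")
--
--     lines += [
--         "",
--         "## Full Dataflow List",
--         "",
--         "| Workspace | Dataflow Name |",
--         "|-----------|---------------|",
--     ]
--     for ws, df in ordered:
--         lines.append(f"| {ws} | {df} |")
--
--     lines.append("")
--     return "\n".join(lines)
-- ===== Notes on version B (the rewrite author's own statement) =====
-- stated objective: alternative
-- what changed: B replaces A's dict-of-sets (whose keys and per-workspace sets are re-sorted separately in each report section) by one deduplicated set of (workspace, dataflow) pairs sorted once; a single ordered table then drives the coverage counts, the summary rows and the full list, and the dead '—' empty-flows branch disappears.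
import Mathlib
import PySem

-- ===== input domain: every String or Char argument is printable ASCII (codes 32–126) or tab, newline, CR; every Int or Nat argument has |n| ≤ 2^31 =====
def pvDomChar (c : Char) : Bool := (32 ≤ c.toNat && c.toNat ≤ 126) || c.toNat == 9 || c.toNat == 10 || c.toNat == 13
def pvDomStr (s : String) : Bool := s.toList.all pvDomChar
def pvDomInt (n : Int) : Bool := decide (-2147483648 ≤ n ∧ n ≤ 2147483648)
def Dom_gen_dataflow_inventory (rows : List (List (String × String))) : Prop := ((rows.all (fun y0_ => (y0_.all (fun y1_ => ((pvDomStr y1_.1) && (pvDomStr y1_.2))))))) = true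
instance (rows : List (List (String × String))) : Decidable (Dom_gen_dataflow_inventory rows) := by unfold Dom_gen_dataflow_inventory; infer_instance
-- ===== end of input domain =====

-- B collects the distinct (workspace, dataflow) pairs in one set and derives a single sorted
-- table that drives every report section, instead of A's dict-of-sets re-sorted per section;
-- same output, alternative decomposition (no speed claim).

-- ===== PORT A =====

-- Python `safe(v)` (shared by both versions' sources)
def pySafe (v : Option String) : String :=
  match v with
  | some s => PySem.Str.strip s
  | none => ""

-- the `ws_flows` dict-building loop of A (setdefault(ws, set()).add(df) = modify ws ∅ (add · df))
def aWsFlows (rows : List (List (String × String))) : PySem.Dict String (PySem.Set String) :=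
  rows.foldl (fun d r =>
    if pySafe ((PySem.Dict.mk r).get? "workspace_name") ≠ "" ∧
       pySafe ((PySem.Dict.mk r).get? "dataflow_name") ≠ "" then
      PySem.Dict.modify d (pySafe ((PySem.Dict.mk r).get? "workspace_name")) PySem.Set.empty
        (fun s => PySem.Set.add s (pySafe ((PySem.Dict.mk r).get? "dataflow_name")))
    else d) PySem.Dict.empty

def gen_dataflow_inventory (rows : List (List (String × String))) : String :=
  PySem.Str.join "\n"
    (((PySem.List.sorted (aWsFlows rows).keys (fun k => k)).foldl
        -- for ws_name in sorted(...): for df in sorted(ws_flows[ws_name]): lines.append(...)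
        (fun acc ws_name =>
          (PySem.List.sorted ((aWsFlows rows).getD ws_name PySem.Set.empty) (fun x => x)).foldl
            (fun acc2 df => acc2 ++ ["| " ++ ws_name ++ " | " ++ df ++ " |"]) acc)
        -- summary loop (ws_flows[ws_name] = getD: the key comes from keys), then the mid header block
        ((PySem.List.sorted (aWsFlows rows).keys (fun k => k)).foldl
          (fun acc ws_name =>
            acc ++ ["| " ++ ws_name ++ " | "
              ++ PySem.Int.toStr ((PySem.List.sorted ((aWsFlows rows).getD ws_name PySem.Set.empty) (fun x => x)).length : Int)
              ++ " | "
              ++ (if PySem.List.sorted ((aWsFlows rows).getD ws_name PySem.Set.empty) (fun x => x) ≠ [] then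
                    PySem.Str.join "<br>" (PySem.List.sorted ((aWsFlows rows).getD ws_name PySem.Set.empty) (fun x => x))
                  else "—")
              ++ " |"])
          ["# Dataflow Inventory",
           "",
           "Auto-generated from **DFW Lineage** sheet of `MKC PowerBI Inventory (1).xlsx`.",
           "",
           "!!! info \"Coverage\"",
           "    **" ++ PySem.Int.toStr (((aWsFlows rows).values.map PySem.Set.len).sum)
             ++ " unique dataflows** across **"
             ++ PySem.Int.toStr ((aWsFlows rows).size : Int) ++ " workspaces**",
           "",
           "## Summary by Workspace",
           "",
           "| Workspace | Dataflow Count | Dataflow Names |",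
           "|-----------|---------------|----------------|"]
         ++ ["",
             "## Full Dataflow List",
             "",
             "| Workspace | Dataflow Name |",
             "|-----------|---------------|"]))
      ++ [""])

-- ===== PORT B =====

-- B's `pairs` set of distinct (workspace, dataflow) pairs
def bPairs (rows : List (List (String × String))) : PySem.Set (String × String) :=
  rows.foldl (fun s r =>
    if pySafe ((PySem.Dict.mk r).get? "workspace_name") ≠ "" ∧
       pySafe ((PySem.Dict.mk r).get? "dataflow_name") ≠ "" then
      PySem.Set.add s (pySafe ((PySem.Dict.mk r).get? "workspace_name"),
                       pySafe ((PySem.Dict.mk r).get? "dataflow_name"))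
    else s) PySem.Set.empty

-- ordered = sorted(pairs)  (tuple comparison)
def bOrdered (rows : List (List (String × String))) : List (String × String) :=
  PySem.List.sorted2 (bPairs rows) (fun p => p.1) (fun p => p.2)

-- first occurrences of the workspaces, in sorted order
def bWsList (rows : List (List (String × String))) : List String :=
  (bOrdered rows).foldl (fun acc p => PySem.Set.add acc p.1) PySem.Set.empty

-- table = [(ws, [d for w, d in ordered if w == ws]) for ws in ws_list]
def bTable (rows : List (List (String × String))) : List (String × List String) :=
  (bWsList rows).map (fun ws => (ws, ((bOrdered rows).filter (fun p => p.1 == ws)).map (fun p => p.2)))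

def gen_dataflow_inventory_alt (rows : List (List (String × String))) : String :=
  PySem.Str.join "\n"
    (["# Dataflow Inventory",
      "",
      "Auto-generated from **DFW Lineage** sheet of `MKC PowerBI Inventory (1).xlsx`.",
      "",
      "!!! info \"Coverage\"",
      "    **" ++ PySem.Int.toStr ((bOrdered rows).length : Int)
        ++ " unique dataflows** across **"
        ++ PySem.Int.toStr ((bWsList rows).length : Int) ++ " workspaces**",
      "",
      "## Summary by Workspace",
      "",
      "| Workspace | Dataflow Count | Dataflow Names |",
      "|-----------|---------------|----------------|"]
     ++ (bTable rows).map (fun t =>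
          "| " ++ t.1 ++ " | " ++ PySem.Int.toStr (t.2.length : Int) ++ " | "
            ++ PySem.Str.join "<br>" t.2 ++ " |")
     ++ ["",
         "## Full Dataflow List",
         "",
         "| Workspace | Dataflow Name |",
         "|-----------|---------------|"]
     ++ (bOrdered rows).map (fun p => "| " ++ p.1 ++ " | " ++ p.2 ++ " |")
     ++ [""])

-- ===== PRECONDITION & SPEC =====
def Spec_gen_dataflow_inventory (rows : List (List (String × String))) (out : String) : Prop := out = gen_dataflow_inventory_alt rows
instance (rows : List (List (String × String))) (out : String) : Decidable (Spec_gen_dataflow_inventory rows out) := by unfold Spec_gen_dataflow_inventory; infer_instance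

-- ===== CLAIM (what is proved, stated in full; the proofs are below) =====
def Claim_equal_gen_dataflow_inventory : Prop := ∀ (rows : List (List (String × String))), Dom_gen_dataflow_inventory rows → Spec_gen_dataflow_inventory rows (gen_dataflow_inventory rows)

-- ===== LEMMAS AND PROOFS =====

-- lexicographic (Python tuple) order on string pairs
def pvLexLt (p q : String × String) : Prop := p.1 < q.1 ∨ (p.1 = q.1 ∧ p.2 < q.2)
def pvLexLe (p q : String × String) : Prop := ¬ pvLexLt q p
def pvB (p q : String × String) : Bool :=
  decide (p.1 < q.1) || !decide (q.1 < p.1) && decide (p.2 < q.2)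

-- sorted view of one workspace's flow set / of the key list / the whole canonical table
def pvGroup (d : PySem.Dict String (PySem.Set String)) (k : String) : List String :=
  PySem.List.sorted (d.getD k PySem.Set.empty) (fun x => x)
def pvKeys (d : PySem.Dict String (PySem.Set String)) : List String :=
  PySem.List.sorted d.keys (fun k => k)
def pvCanon (d : PySem.Dict String (PySem.Set String)) : List (String × String) :=
  (pvKeys d).flatMap (fun k => (pvGroup d k).map (fun v => (k, v)))

-- joint invariant of A's dict and B's pair set
def pvInv (d : PySem.Dict String (PySem.Set String)) (P : List (String × String)) : Prop :=
  d.keys.Nodup ∧ P.Nodup ∧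
  (∀ k, k ∈ d.keys → (d.getD k PySem.Set.empty).Nodup ∧ d.getD k PySem.Set.empty ≠ []) ∧
  (∀ k, k ∉ d.keys → d.getD k PySem.Set.empty = []) ∧
  (∀ k v, (k, v) ∈ P ↔ v ∈ d.getD k PySem.Set.empty)

lemma pvLexLt_irrefl (p : String × String) : ¬ pvLexLt p p := by
  rintro (h | ⟨_, h⟩) <;> exact lt_irrefl _ h

lemma pvLexLt_trans {p q r : String × String} (h1 : pvLexLt p q) (h2 : pvLexLt q r) :
    pvLexLt p r := by
  rcases h1 with h1 | ⟨e1, h1⟩ <;> rcases h2 with h2 | ⟨e2, h2⟩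
  · exact Or.inl (lt_trans h1 h2)
  · exact Or.inl (by rw [← e2]; exact h1)
  · exact Or.inl (by rw [e1]; exact h2)
  · exact Or.inr ⟨e1.trans e2, lt_trans h1 h2⟩

lemma pvLexLt_asymm {p q : String × String} (h : pvLexLt p q) : ¬ pvLexLt q p :=
  fun h' => pvLexLt_irrefl p (pvLexLt_trans h h')

lemma pvLexLe_antisymm {p q : String × String} (h1 : pvLexLe p q) (h2 : pvLexLe q p) : p = q := by
  unfold pvLexLe pvLexLt at h1 h2
  have e1 : p.1 = q.1 := by
    rcases lt_trichotomy p.1 q.1 with h | h | h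
    · exact absurd (Or.inl h) h2
    · exact h
    · exact absurd (Or.inl h) h1
  have e2 : p.2 = q.2 := by
    rcases lt_trichotomy p.2 q.2 with h | h | h
    · exact absurd (Or.inr ⟨e1, h⟩) h2
    · exact h
    · exact absurd (Or.inr ⟨e1.symm, h⟩) h1
  exact Prod.ext_iff.mpr ⟨e1, e2⟩

lemma pvB_iff (p q : String × String) : pvB p q = true ↔ pvLexLt p q := by
  unfold pvB pvLexLt
  simp only [Bool.or_eq_true, Bool.and_eq_true, Bool.not_eq_true', decide_eq_true_eq,
    decide_eq_false_iff_not]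
  constructor
  · rintro (h | ⟨h1, h2⟩)
    · exact Or.inl h
    · rcases lt_trichotomy p.1 q.1 with h' | h' | h'
      · exact Or.inl h'
      · exact Or.inr ⟨h', h2⟩
      · exact absurd h' h1
  · rintro (h | ⟨h1, h2⟩)
    · exact Or.inl h
    · refine Or.inr ⟨?_, h2⟩
      intro hlt; rw [h1] at hlt; exact lt_irrefl _ hlt

lemma pvB_eq_false (p q : String × String) : pvB p q = false ↔ pvLexLe q p := by
  unfold pvLexLe
  rw [← pvB_iff]
  cases pvB p q <;> simp

lemma pvInsertBy_pairwise (x : String × String) (l : List (String × String))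
    (h : l.Pairwise pvLexLe) : (PySem.List.insertBy pvB x l).Pairwise pvLexLe := by
  induction l with
  | nil => simp [PySem.List.insertBy]
  | cons y ys ih =>
    by_cases hb : pvB x y = true
    · rw [show PySem.List.insertBy pvB x (y :: ys) = x :: y :: ys from by
        simp [PySem.List.insertBy, hb]]
      have hxy : pvLexLt x y := (pvB_iff x y).mp hb
      refine List.pairwise_cons.mpr ⟨?_, h⟩
      intro z hz
      rcases List.mem_cons.mp hz with rfl | hz'
      · exact pvLexLt_asymm hxy
      · have hyz : pvLexLe y z := (List.pairwise_cons.mp h).1 z hz'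
        intro hzx; exact hyz (pvLexLt_trans hzx hxy)
    · have hb' : pvB x y = false := by revert hb; cases pvB x y <;> simp
      rw [show PySem.List.insertBy pvB x (y :: ys) = y :: PySem.List.insertBy pvB x ys from by
        simp [PySem.List.insertBy, hb']]
      rcases List.pairwise_cons.mp h with ⟨hy, hys⟩
      refine List.pairwise_cons.mpr ⟨?_, ih hys⟩
      intro z hz
      rcases (PySem.List.mem_insertBy pvB x z ys).mp hz with rfl | hz'
      · exact (pvB_eq_false _ _).mp hb'
      · exact hy z hz'

lemma pvSorted2_pairwise (xs : List (String × String)) :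
    (PySem.List.sorted2 xs (fun p => p.1) (fun p => p.2)).Pairwise pvLexLe := by
  have key : ∀ (l : List (String × String)) (acc : List (String × String)),
      acc.Pairwise pvLexLe →
      (l.foldl (fun acc x => PySem.List.insertBy pvB x acc) acc).Pairwise pvLexLe := by
    intro l
    induction l with
    | nil => intro acc h; exact h
    | cons x xs ih => intro acc h; exact ih _ (pvInsertBy_pairwise x acc h)
  have he : PySem.List.sorted2 xs (fun p => p.1) (fun p => p.2) =
      xs.foldl (fun acc x => PySem.List.insertBy pvB x acc) [] := rfl
  rw [he]
  exact key xs [] (by simp)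

lemma pvInv_empty : pvInv PySem.Dict.empty [] := by
  refine ⟨by simp [PySem.Dict.keys_empty], by simp, ?_, ?_, ?_⟩
  · intro k hk; rw [PySem.Dict.keys_empty] at hk; cases hk
  · intro k _; exact PySem.Dict.getD_empty k _
  · intro k v; simp [PySem.Dict.getD_empty]

lemma pvInv_step (d : PySem.Dict String (PySem.Set String)) (P : List (String × String))
    (ws df : String) (h : pvInv d P) :
    pvInv (PySem.Dict.modify d ws PySem.Set.empty (fun s => PySem.Set.add s df))
          (PySem.Set.add P (ws, df)) := by
  obtain ⟨hk, hP, hg, h0, hm⟩ := h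
  have hmemk : ∀ k', k' ∈ (PySem.Dict.modify d ws PySem.Set.empty
      (fun s => PySem.Set.add s df)).keys ↔ k' = ws ∨ k' ∈ d.keys := by
    intro k'
    rw [PySem.Dict.keys_modify]
    exact PySem.Dict.mem_keys_insert d ws k' _
  have hgetD : ∀ k', (PySem.Dict.modify d ws PySem.Set.empty
      (fun s => PySem.Set.add s df)).getD k' PySem.Set.empty =
      if k' = ws then PySem.Set.add (d.getD ws PySem.Set.empty) df
      else d.getD k' PySem.Set.empty :=
    fun k' => PySem.Dict.getD_modify d ws k' _ _
  refine ⟨?_, PySem.Set.nodup_add P (ws, df) hP, ?_, ?_, ?_⟩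
  · rw [PySem.Dict.keys_modify]
    exact PySem.Dict.nodup_keys_insert d ws _ hk
  · intro k hkmem
    rw [hgetD k]
    by_cases e : k = ws
    · rw [if_pos e]
      constructor
      · apply PySem.Set.nodup_add
        by_cases hws : ws ∈ d.keys
        · exact (hg ws hws).1
        · rw [h0 ws hws]; exact List.nodup_nil
      · have hdf : df ∈ PySem.Set.add (d.getD ws PySem.Set.empty) df :=
          (PySem.Set.mem_add _ df df).mpr (Or.inr rfl)
        intro hnil; rw [hnil] at hdf; cases hdf
    · rw [if_neg e]
      apply hg
      rcases (hmemk k).mp hkmem with e' | hmem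
      · exact absurd e' e
      · exact hmem
  · intro k hnk
    have hne : k ≠ ws := fun e => hnk ((hmemk k).mpr (Or.inl e))
    rw [hgetD k, if_neg hne]
    exact h0 k (fun hmem => hnk ((hmemk k).mpr (Or.inr hmem)))
  · intro k v
    rw [PySem.Set.mem_add, hgetD k]
    by_cases e : k = ws
    · subst e
      rw [if_pos rfl, PySem.Set.mem_add]
      constructor
      · rintro (hp | he)
        · exact Or.inl ((hm k v).mp hp)
        · cases he; exact Or.inr rfl
      · rintro (hv | hv)
        · exact Or.inl ((hm k v).mpr hv)
        · exact Or.inr (by rw [hv])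
    · rw [if_neg e]
      constructor
      · rintro (hp | he)
        · exact (hm k v).mp hp
        · exact absurd (congrArg Prod.fst he) e
      · intro hv; exact Or.inl ((hm k v).mpr hv)

lemma pvInv_foldl (rows : List (List (String × String))) :
    ∀ (d : PySem.Dict String (PySem.Set String)) (P : PySem.Set (String × String)), pvInv d P →
    pvInv (rows.foldl (fun d r =>
            if pySafe ((PySem.Dict.mk r).get? "workspace_name") ≠ "" ∧
               pySafe ((PySem.Dict.mk r).get? "dataflow_name") ≠ "" then
              PySem.Dict.modify d (pySafe ((PySem.Dict.mk r).get? "workspace_name")) PySem.Set.empty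
                (fun s => PySem.Set.add s (pySafe ((PySem.Dict.mk r).get? "dataflow_name")))
            else d) d)
          (rows.foldl (fun s r =>
            if pySafe ((PySem.Dict.mk r).get? "workspace_name") ≠ "" ∧
               pySafe ((PySem.Dict.mk r).get? "dataflow_name") ≠ "" then
              PySem.Set.add s (pySafe ((PySem.Dict.mk r).get? "workspace_name"),
                               pySafe ((PySem.Dict.mk r).get? "dataflow_name"))
            else s) P) := by
  induction rows with
  | nil => intro d P h; exact h
  | cons r rows ih =>
    intro d P h
    simp only [List.foldl_cons]
    by_cases hc : pySafe ((PySem.Dict.mk r).get? "workspace_name") ≠ "" ∧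
        pySafe ((PySem.Dict.mk r).get? "dataflow_name") ≠ ""
    · rw [if_pos hc, if_pos hc]
      exact ih _ _ (pvInv_step _ _ _ _ h)
    · rw [if_neg hc, if_neg hc]
      exact ih _ _ h

lemma pvInv_fold (rows : List (List (String × String))) :
    pvInv (aWsFlows rows) (bPairs rows) := by
  unfold aWsFlows bPairs
  exact pvInv_foldl rows _ _ pvInv_empty

lemma pvKeys_nodup (rows : List (List (String × String))) :
    (pvKeys (aWsFlows rows)).Nodup := by
  obtain ⟨hk, -, -, -, -⟩ := pvInv_fold rows
  exact ((PySem.List.sorted_perm (aWsFlows rows).keys (fun k => k) false).nodup_iff).mpr hk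

lemma pvGroup_ne (rows : List (List (String × String))) :
    ∀ k ∈ pvKeys (aWsFlows rows), pvGroup (aWsFlows rows) k ≠ [] := by
  obtain ⟨-, -, hg, -, -⟩ := pvInv_fold rows
  intro k hkk
  have hk' : k ∈ (aWsFlows rows).keys := (PySem.List.mem_sorted _ _ _ k).mp hkk
  unfold pvGroup
  rw [Ne, PySem.List.sorted_eq_nil_iff]
  exact (hg k hk').2

lemma pvCanon_pairwise (d : PySem.Dict String (PySem.Set String)) (hnd : d.keys.Nodup)
    (hg : ∀ k, k ∈ d.keys → (d.getD k PySem.Set.empty).Nodup) :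
    (pvCanon d).Pairwise pvLexLt := by
  have hks : (pvKeys d).Pairwise (· < ·) := by
    have h1 := PySem.List.sorted_pairwise d.keys (fun k => k)
    have h2 : (pvKeys d).Nodup :=
      ((PySem.List.sorted_perm d.keys (fun k => k) false).nodup_iff).mpr hnd
    exact (h1.and h2).imp (fun hab => lt_of_le_of_ne hab.1 hab.2)
  have hgk : ∀ k ∈ pvKeys d, (pvGroup d k).Pairwise (· < ·) := by
    intro k hkk
    have hk' : k ∈ d.keys := (PySem.List.mem_sorted _ _ _ k).mp hkk
    have h1 := PySem.List.sorted_pairwise (d.getD k PySem.Set.empty) (fun x => x)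
    have h2 : (pvGroup d k).Nodup :=
      ((PySem.List.sorted_perm (d.getD k PySem.Set.empty) (fun x => x) false).nodup_iff).mpr
        (hg k hk')
    exact (h1.and h2).imp (fun hab => lt_of_le_of_ne hab.1 hab.2)
  unfold pvCanon
  have main : ∀ (ks : List String), ks.Pairwise (· < ·) →
      (∀ k ∈ ks, (pvGroup d k).Pairwise (· < ·)) →
      (ks.flatMap (fun k => (pvGroup d k).map (fun v => (k, v)))).Pairwise pvLexLt := by
    intro ks
    induction ks with
    | nil => intro _ _; simp
    | cons k ks ih =>
      intro hpw hgs
      rw [List.flatMap_cons, List.pairwise_append]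
      refine ⟨?_, ih hpw.of_cons (fun k' hk' => hgs k' (List.mem_cons_of_mem _ hk')), ?_⟩
      · rw [List.pairwise_map]
        exact (hgs k (by simp)).imp (fun hvw => Or.inr ⟨rfl, hvw⟩)
      · intro a ha b hb
        rcases List.mem_map.mp ha with ⟨v, -, rfl⟩
        rcases List.mem_flatMap.mp hb with ⟨k', hk', hbk⟩
        rcases List.mem_map.mp hbk with ⟨v', -, rfl⟩
        exact Or.inl ((List.pairwise_cons.mp hpw).1 k' hk')
  exact main (pvKeys d) hks hgk

lemma pvMem_canon (d : PySem.Dict String (PySem.Set String))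
    (h0 : ∀ k, k ∉ d.keys → d.getD k PySem.Set.empty = []) (p : String × String) :
    p ∈ pvCanon d ↔ p.2 ∈ d.getD p.1 PySem.Set.empty := by
  unfold pvCanon pvKeys pvGroup
  simp only [List.mem_flatMap, List.mem_map, PySem.List.mem_sorted]
  constructor
  · rintro ⟨k, hk, v, hv, rfl⟩
    exact hv
  · intro hv
    by_cases hk : p.1 ∈ d.keys
    · exact ⟨p.1, hk, p.2, hv, rfl⟩
    · rw [h0 p.1 hk] at hv; cases hv

lemma pvOrdered_eq_canon (rows : List (List (String × String))) :
    bOrdered rows = pvCanon (aWsFlows rows) := by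
  obtain ⟨hk, hP, hg, h0, hm⟩ := pvInv_fold rows
  have hcanonLt : (pvCanon (aWsFlows rows)).Pairwise pvLexLt :=
    pvCanon_pairwise (aWsFlows rows) hk (fun k hkk => (hg k hkk).1)
  have hcanonNd : (pvCanon (aWsFlows rows)).Nodup :=
    hcanonLt.imp (fun hab => fun e => pvLexLt_irrefl _ (e ▸ hab))
  have hperm : (bPairs rows).Perm (pvCanon (aWsFlows rows)) := by
    rw [List.perm_ext_iff_of_nodup hP hcanonNd]
    intro p
    rw [pvMem_canon (aWsFlows rows) h0 p]
    exact hm p.1 p.2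
  have hs2 : (PySem.List.sorted2 (bPairs rows) (fun p => p.1) (fun p => p.2)).Perm
      (pvCanon (aWsFlows rows)) :=
    (PySem.List.sorted2_perm (bPairs rows) _ _ false).trans hperm
  have hcanonLe : (pvCanon (aWsFlows rows)).Pairwise pvLexLe :=
    hcanonLt.imp (fun hab => pvLexLt_asymm hab)
  unfold bOrdered
  exact List.Perm.eq_of_pairwise (fun a b _ _ h1 h2 => pvLexLe_antisymm h1 h2)
    (pvSorted2_pairwise (bPairs rows)) hcanonLe hs2

lemma pvAdd_of_not_mem (s : PySem.Set String) (k : String) (h : k ∉ s) :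
    PySem.Set.add s k = s ++ [k] := by
  simp only [PySem.Set.add, PySem.Set.contains]
  rw [if_neg (fun hc => h (List.contains_iff_mem.mp hc))]

lemma pvFoldlAdd_const (k : String) (l : List String) (s : PySem.Set String) (hks : k ∈ s) :
    l.foldl (fun s _ => PySem.Set.add s k) s = s := by
  induction l with
  | nil => rfl
  | cons v vs ih =>
    have hadd : PySem.Set.add s k = s := by
      simp only [PySem.Set.add, PySem.Set.contains]
      rw [if_pos (List.contains_iff_mem.mpr hks)]
    rw [List.foldl_cons, hadd]
    exact ih

lemma pvFoldlFirsts (g : String → List String) :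
    ∀ (ks : List String) (acc : PySem.Set String),
    ks.Nodup → (∀ k ∈ ks, g k ≠ []) → (∀ k ∈ ks, k ∉ acc) →
    (ks.flatMap (fun k => (g k).map (fun v => (k, v)))).foldl
      (fun acc p => PySem.Set.add acc p.1) acc = acc ++ ks := by
  intro ks
  induction ks with
  | nil => intro acc _ _ _; simp
  | cons k ks ih =>
    intro acc hnd hne hnm
    rw [List.flatMap_cons, List.foldl_append]
    have h1 : (((g k).map (fun v => (k, v))).foldl (fun acc p => PySem.Set.add acc p.1) acc)
        = acc ++ [k] := by
      rw [List.foldl_map]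
      obtain ⟨v, vs, hv⟩ : ∃ v vs, g k = v :: vs := by
        cases hgk : g k with
        | nil => exact absurd hgk (hne k (by simp))
        | cons a as => exact ⟨a, as, rfl⟩
      rw [hv, List.foldl_cons]
      show (vs.foldl (fun s _ => PySem.Set.add s k) (PySem.Set.add acc k)) = acc ++ [k]
      rw [pvAdd_of_not_mem acc k (hnm k (by simp))]
      exact pvFoldlAdd_const k vs _ (by simp)
    rw [h1, ih (acc ++ [k]) hnd.of_cons (fun k' h => hne k' (List.mem_cons_of_mem _ h)) ?_]
    · simp
    · intro k' hk' hmem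
      rcases List.mem_append.mp hmem with hmem' | hmem'
      · exact hnm k' (List.mem_cons_of_mem _ hk') hmem'
      · rcases List.mem_singleton.mp hmem' with rfl
        exact (List.nodup_cons.mp hnd).1 hk'

lemma pvWsList_eq_keys (rows : List (List (String × String))) :
    bWsList rows = pvKeys (aWsFlows rows) := by
  unfold bWsList
  rw [pvOrdered_eq_canon]
  unfold pvCanon
  have h := pvFoldlFirsts (pvGroup (aWsFlows rows)) (pvKeys (aWsFlows rows)) []
    (pvKeys_nodup rows) (pvGroup_ne rows) (by intro k _; simp)
  show ((pvKeys (aWsFlows rows)).flatMap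
      (fun k => (pvGroup (aWsFlows rows) k).map (fun v => (k, v)))).foldl
      (fun acc p => PySem.Set.add acc p.1) [] = pvKeys (aWsFlows rows)
  rw [h]
  simp

lemma pvFilterFlatNot (g : String → List String) (ws : String) :
    ∀ (ks : List String), ws ∉ ks →
    (ks.flatMap (fun k => (g k).map (fun v => (k, v)))).filter (fun p => p.1 == ws) = [] := by
  intro ks
  induction ks with
  | nil => intro _; simp
  | cons k ks ih =>
    intro h
    rw [List.flatMap_cons, List.filter_append, ih (fun hm => h (List.mem_cons_of_mem _ hm))]
    rw [List.filter_map]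
    have hcomp : ((fun p : String × String => p.1 == ws) ∘ fun v => (k, v))
        = fun _ => (k == ws) := rfl
    rw [hcomp]
    have hf : (k == ws) = false := by
      have : k ≠ ws := fun e => h (by rw [e]; simp)
      simp [this]
    rw [hf]
    simp

lemma pvFilterFlat (g : String → List String) (ws : String) :
    ∀ (ks : List String), ks.Nodup → ws ∈ ks →
    (ks.flatMap (fun k => (g k).map (fun v => (k, v)))).filter (fun p => p.1 == ws)
      = (g ws).map (fun v => (ws, v)) := by
  intro ks
  induction ks with
  | nil => intro _ h; cases h
  | cons k ks ih =>
    intro hnd hmem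
    rw [List.flatMap_cons, List.filter_append]
    by_cases e : k = ws
    · subst e
      rw [pvFilterFlatNot g k ks (List.nodup_cons.mp hnd).1]
      rw [List.filter_map]
      have hcomp : ((fun p : String × String => p.1 == k) ∘ fun v => (k, v))
          = fun _ => true := by funext v; simp
      rw [hcomp]
      simp
    · rcases List.mem_cons.mp hmem with h' | hmem'
      · exact absurd h'.symm e
      · rw [ih hnd.of_cons hmem']
        rw [List.filter_map]
        have hcomp : ((fun p : String × String => p.1 == ws) ∘ fun v => (k, v))
            = fun _ => (k == ws) := rfl
        rw [hcomp]
        have hf : (k == ws) = false := by simp [e]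
        rw [hf]
        simp

lemma pvTable_eq (rows : List (List (String × String))) :
    bTable rows = (pvKeys (aWsFlows rows)).map
      (fun ws => (ws, pvGroup (aWsFlows rows) ws)) := by
  unfold bTable
  rw [pvWsList_eq_keys, pvOrdered_eq_canon]
  apply List.map_congr_left
  intro ws hws
  unfold pvCanon
  rw [pvFilterFlat (pvGroup (aWsFlows rows)) ws (pvKeys (aWsFlows rows))
    (pvKeys_nodup rows) hws]
  rw [List.map_map]
  have hcomp : ((fun p : String × String => p.2) ∘ fun v => (ws, v)) = id := rfl
  rw [hcomp, List.map_id]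

lemma pvTotal_eq (rows : List (List (String × String))) :
    ((aWsFlows rows).values.map PySem.Set.len).sum = ((bOrdered rows).length : Int) := by
  obtain ⟨hk, -, -, -, -⟩ := pvInv_fold rows
  rw [pvOrdered_eq_canon]
  have e1 : ∀ k, PySem.Set.len ((aWsFlows rows).getD k PySem.Set.empty)
      = ((pvGroup (aWsFlows rows) k).length : Int) := by
    intro k
    unfold pvGroup
    rw [PySem.List.length_sorted]
    rfl
  calc ((aWsFlows rows).values.map PySem.Set.len).sum
      = (((aWsFlows rows).keys.map (fun k => (aWsFlows rows).getD k PySem.Set.empty)).map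
          PySem.Set.len).sum := by
        rw [PySem.Dict.values_eq_map_keys (aWsFlows rows) hk]
    _ = ((aWsFlows rows).keys.map (fun k => ((pvGroup (aWsFlows rows) k).length : Int))).sum := by
        rw [List.map_map]
        exact congrArg _ (List.map_congr_left (fun k _ => e1 k))
    _ = ((pvKeys (aWsFlows rows)).map (fun k => ((pvGroup (aWsFlows rows) k).length : Int))).sum :=
        (((PySem.List.sorted_perm (aWsFlows rows).keys (fun k => k) false).map _).sum_eq).symm
    _ = (((pvKeys (aWsFlows rows)).map (fun k => (pvGroup (aWsFlows rows) k).length)).sum : Int) := by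
        rw [Nat.cast_list_sum, List.map_map]
        rfl
    _ = ((pvCanon (aWsFlows rows)).length : Int) := by
        unfold pvCanon
        rw [List.length_flatMap]
        have hmc : (pvKeys (aWsFlows rows)).map
            (fun a => ((pvGroup (aWsFlows rows) a).map (fun v => (a, v))).length)
            = (pvKeys (aWsFlows rows)).map (fun k => (pvGroup (aWsFlows rows) k).length) :=
          List.map_congr_left (fun k _ => by rw [List.length_map])
        rw [hmc]

lemma pvCount_eq (rows : List (List (String × String))) :
    (aWsFlows rows).size = (bWsList rows).length := by
  rw [pvWsList_eq_keys]
  unfold pvKeys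
  rw [PySem.List.length_sorted]
  simp [PySem.Dict.size, PySem.Dict.keys]

lemma pvSummary_eq (rows : List (List (String × String))) :
    (PySem.List.sorted (aWsFlows rows).keys (fun k => k)).map (fun ws_name =>
        "| " ++ ws_name ++ " | "
          ++ PySem.Int.toStr ((PySem.List.sorted ((aWsFlows rows).getD ws_name PySem.Set.empty) (fun x => x)).length : Int)
          ++ " | "
          ++ (if PySem.List.sorted ((aWsFlows rows).getD ws_name PySem.Set.empty) (fun x => x) ≠ [] then
                PySem.Str.join "<br>" (PySem.List.sorted ((aWsFlows rows).getD ws_name PySem.Set.empty) (fun x => x))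
              else "—")
          ++ " |")
      = (bTable rows).map (fun t =>
          "| " ++ t.1 ++ " | " ++ PySem.Int.toStr (t.2.length : Int) ++ " | "
            ++ PySem.Str.join "<br>" t.2 ++ " |") := by
  rw [pvTable_eq, List.map_map]
  show (pvKeys (aWsFlows rows)).map _ = _
  apply List.map_congr_left
  intro ws hws
  have hne : pvGroup (aWsFlows rows) ws ≠ [] := pvGroup_ne rows ws hws
  show "| " ++ ws ++ " | "
      ++ PySem.Int.toStr ((pvGroup (aWsFlows rows) ws).length : Int)
      ++ " | "
      ++ (if pvGroup (aWsFlows rows) ws ≠ [] then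
            PySem.Str.join "<br>" (pvGroup (aWsFlows rows) ws)
          else "—")
      ++ " |" = _
  rw [if_pos hne]
  rfl

lemma pvFull_eq (rows : List (List (String × String))) :
    ((PySem.List.sorted (aWsFlows rows).keys (fun k => k)).flatMap (fun ws_name =>
        (PySem.List.sorted ((aWsFlows rows).getD ws_name PySem.Set.empty) (fun x => x)).map
          (fun df => "| " ++ ws_name ++ " | " ++ df ++ " |")))
      = (bOrdered rows).map (fun p => "| " ++ p.1 ++ " | " ++ p.2 ++ " |") := by
  rw [pvOrdered_eq_canon]
  unfold pvCanon pvKeys pvGroup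
  rw [List.map_flatMap]
  simp only [List.map_map]
  rfl

-- ===== VERDICT (by name: the statement is the Claim_ definition above) =====
theorem gen_dataflow_inventory_spec : Claim_equal_gen_dataflow_inventory := by
  unfold Claim_equal_gen_dataflow_inventory
  intro rows _
  unfold Spec_gen_dataflow_inventory gen_dataflow_inventory gen_dataflow_inventory_alt
  simp only [PySem.List.foldl_append_singleton_eq_map]
  simp only [PySem.List.foldl_append_eq_flatMap]
  rw [pvTotal_eq rows, pvCount_eq rows, pvSummary_eq rows, pvFull_eq rows]
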